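-- pv_equiv track=rewrite | github.com/tonyvu2014/algorithm | map/find_longest_word.py | get_letter_position_map
-- ===== SOURCE A (Python) =====
-- def get_letter_position_map(sequence):
--     letter_positions = {}
--
--     # pre-processing, create a map from letters in the sequence
--     # to the list of its positions
--     for index, letter in enumerate(list(sequence)):
--         if letter not in letter_positions:
--             letter_positions.update({letter: [index]})
--         else:
--             letter_positions[letter].append(index)
--
--     return letter_positions
-- ===== SOURCE B (Python) =====
-- def get_letter_position_map(sequence):
--     # distinct letters in first-occurrence order, then one full scan per letter
--     distinct = list(dict.fromkeys(sequence))
--     return {c: [i for i, x in enumerate(sequence) if x == c] for c in distinct}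
-- ===== Notes on version B (the rewrite author's own statement) =====
-- stated objective: alternative
-- what changed: Replaces A's single incremental dict-building pass with an outer loop over the distinct letters (ordered dedup) that rescans the whole sequence once per distinct letter to collect its positions.
import Mathlib
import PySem

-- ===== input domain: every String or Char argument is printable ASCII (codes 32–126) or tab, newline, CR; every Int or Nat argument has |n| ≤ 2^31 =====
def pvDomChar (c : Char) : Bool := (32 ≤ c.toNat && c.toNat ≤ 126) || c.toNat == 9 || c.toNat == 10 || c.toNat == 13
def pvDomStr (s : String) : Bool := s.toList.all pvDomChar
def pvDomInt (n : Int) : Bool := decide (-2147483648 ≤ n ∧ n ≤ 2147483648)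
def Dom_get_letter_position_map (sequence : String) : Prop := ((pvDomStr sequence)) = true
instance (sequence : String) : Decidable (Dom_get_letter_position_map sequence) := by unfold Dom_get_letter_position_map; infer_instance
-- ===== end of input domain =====

-- B replaces A's one incremental dict-building pass by an outer loop over the distinct
-- letters with a full rescan of the sequence per letter (alternative decomposition, not faster).

-- ===== PORT A =====
def get_letter_position_map (sequence : String) : List (String × List Int) :=
  ((PySem.List.enumerate sequence.toList).foldl
    (fun d (p : Int × Char) =>
      let letter := String.ofList [p.2]
      if d.contains letter = false then
        d.insert letter [p.1]
      else
        d.modify letter [] (fun l => l ++ [p.1]))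
    PySem.Dict.empty).items

-- ===== PORT B =====
def get_letter_position_map_alt (sequence : String) : List (String × List Int) :=
  (PySem.List.dedup sequence.toList).map
    (fun c => (String.ofList [c],
      ((PySem.List.enumerate sequence.toList).filter (fun p => p.2 == c)).map (fun p => p.1)))

-- ===== PRECONDITION & SPEC =====
def Spec_get_letter_position_map (sequence : String) (out : List (String × List Int)) : Prop := out = get_letter_position_map_alt sequence
instance (sequence : String) (out : List (String × List Int)) : Decidable (Spec_get_letter_position_map sequence out) := by unfold Spec_get_letter_position_map; infer_instance

-- ===== CLAIM (what is proved, stated in full; the proofs are below) =====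
def Claim_equal_get_letter_position_map : Prop := ∀ (sequence : String), Dom_get_letter_position_map sequence → Spec_get_letter_position_map sequence (get_letter_position_map sequence)

-- ===== LEMMAS AND PROOFS =====

-- single-character strings: == on String.ofList [·] is == on the characters
theorem pvMk1_beq (a b : Char) : (String.ofList [a] == String.ofList [b]) = (a == b) := by
  by_cases h : a = b
  · simp [h]
  · simp [String.ext_iff, h]

theorem pvMk1_inj : Function.Injective (fun c : Char => String.ofList [c]) := by
  intro a b h
  have := String.ext_iff.mp h
  simpa using this

-- Set.ofList commutes with mapping an injective function
theorem pvSet_add_map {α β : Type} [BEq α] [LawfulBEq α] [BEq β] [LawfulBEq β]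
    (f : α → β) (hf : Function.Injective f) (s : List α) (a : α) :
    PySem.Set.add (s.map f) (f a) = (PySem.Set.add s a).map f := by
  by_cases h : a ∈ s
  · simp [PySem.Set.add, h]
    exact ⟨a, h, rfl⟩
  · have : ¬ f a ∈ s.map f := by
      intro hm
      rcases List.mem_map.mp hm with ⟨x, hx, hfx⟩
      exact h (hf hfx ▸ hx)
    simp [PySem.Set.add, h, List.contains_eq_mem, this]

theorem pvSet_foldl_add_map {α β : Type} [BEq α] [LawfulBEq α] [BEq β] [LawfulBEq β]
    (f : α → β) (hf : Function.Injective f) (l : List α) :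
    ∀ s : List α, List.foldl PySem.Set.add (s.map f) (l.map f) = (List.foldl PySem.Set.add s l).map f := by
  induction l with
  | nil => intro s; simp
  | cons a t ih =>
      intro s
      simp only [List.map_cons, List.foldl_cons]
      rw [pvSet_add_map f hf, ih]

theorem pvSet_ofList_map {α β : Type} [BEq α] [LawfulBEq α] [BEq β] [LawfulBEq β]
    (f : α → β) (hf : Function.Injective f) (l : List α) :
    PySem.Set.ofList (l.map f) = (PySem.Set.ofList l).map f := by
  have := pvSet_foldl_add_map f hf l []
  simpa [PySem.Set.ofList, PySem.Set.empty] using this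

-- a dict with Nodup keys is its keys tagged with their getD values
theorem pvItems_eq_map_keys {κ ν : Type} [BEq κ] [LawfulBEq κ]
    (d : PySem.Dict κ ν) (dflt : ν) (h : d.keys.Nodup) :
    d.items = d.keys.map (fun k => (k, d.getD k dflt)) := by
  have hk : d.keys = d.items.map (fun p => p.1) := by simp [PySem.Dict.keys]
  rw [hk, List.map_map]
  symm
  calc d.items.map (fun p => ((fun k => (k, d.getD k dflt)) ∘ (fun p : κ × ν => p.1)) p)
      = d.items.map id := by
        apply List.map_congr_left
        intro p hp
        have : d.getD p.1 dflt = p.2 := PySem.Dict.getD_of_mem_items d (by simpa using hp) h dflt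
        simp [this]
    _ = d.items := List.map_id _

-- A's two branches are exactly one Dict.modify
theorem pvStep_eq (d : PySem.Dict String (List Int)) (p : Int × Char) :
    (if d.contains (String.ofList [p.2]) = false then
        d.insert (String.ofList [p.2]) [p.1]
      else
        d.modify (String.ofList [p.2]) [] (fun l => l ++ [p.1]))
    = d.modify (String.ofList [p.2]) [] (fun l => l ++ [p.1]) := by
  by_cases hc : d.contains (String.ofList [p.2]) = true
  · simp [hc]
  · have hf : d.contains (String.ofList [p.2]) = false := by
      cases h : d.contains (String.ofList [p.2]) with
      | false => rfl
      | true => exact absurd h hc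
    have hg : d.getD (String.ofList [p.2]) [] = [] := PySem.Dict.getD_of_not_contains d [] hf
    simp [hf, PySem.Dict.modify, hg]

-- ===== VERDICT (by name: the statement is the Claim_ definition above) =====
theorem get_letter_position_map_spec : Claim_equal_get_letter_position_map := by
  intro sequence _
  unfold Spec_get_letter_position_map get_letter_position_map get_letter_position_map_alt
  set l := sequence.toList with hl
  set mk1 : Char → String := fun c => String.ofList [c] with hmk1
  set enum := PySem.List.enumerate l with henum
  -- replace A's branching step by a single modify
  have hstep : ∀ (d : PySem.Dict String (List Int)) (p : Int × Char),
      (fun d (p : Int × Char) =>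
        let letter := String.ofList [p.2]
        if d.contains letter = false then d.insert letter [p.1]
        else d.modify letter [] (fun l => l ++ [p.1])) d p
      = d.modify (mk1 p.2) [] (fun l => l ++ [p.1]) := by
    intro d p; exact pvStep_eq d p
  rw [show (fun d (p : Int × Char) =>
        let letter := String.ofList [p.2]
        if d.contains letter = false then d.insert letter [p.1]
        else d.modify letter [] (fun l => l ++ [p.1]))
      = (fun d (p : Int × Char) => d.modify (mk1 p.2) [] (fun l => l ++ [p.1])) from
      funext fun d => funext fun p => hstep d p]
  set d := enum.foldl (fun d (p : Int × Char) => d.modify (mk1 p.2) [] (fun l => l ++ [p.1]))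
    PySem.Dict.empty with hd
  have hkeys : d.keys = PySem.Set.ofList (l.map mk1) := by
    rw [hd, PySem.Dict.keys_foldl_modify_key enum (fun p : Int × Char => mk1 p.2) []
      (fun _ p => fun v => v ++ [p.1]) PySem.Dict.empty]
    have : enum.map (fun p : Int × Char => mk1 p.2) = l.map mk1 := by
      rw [show (fun p : Int × Char => mk1 p.2) = mk1 ∘ (fun p : Int × Char => p.2) from rfl,
        ← List.map_map]
      congr 1
      exact PySem.List.map_snd_enumerate l 0
    rw [this]
    simp [PySem.Dict.keys_empty, PySem.Set.update_nil_left, PySem.Set.ofList]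
  have hnodup : d.keys.Nodup := by rw [hkeys]; exact PySem.Set.nodup_ofList _
  have hgetD : ∀ c : Char, d.getD (mk1 c) [] =
      (enum.filter (fun p => p.2 == c)).map (fun p => p.1) := by
    intro c
    have hfold : d = (enum.map (fun p : Int × Char => (mk1 p.2, p.1))).foldl
        (fun d q => d.modify q.1 [] (fun v => v ++ [q.2])) PySem.Dict.empty := by
      rw [hd, List.foldl_map]
    rw [hfold, PySem.Dict.getD_foldl_modify_append]
    rw [PySem.Dict.getD_empty, List.nil_append, List.filter_map, List.map_map]
    congr 1
    apply List.filter_congr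
    intro p _
    simp only [Function.comp_apply]
    exact pvMk1_beq p.2 c
  rw [pvItems_eq_map_keys d [] hnodup, hkeys,
    pvSet_ofList_map mk1 pvMk1_inj l, ← PySem.List.dedup_eq_ofList, List.map_map]
  apply List.map_congr_left
  intro c _
  simp only [Function.comp_apply]
  rw [hgetD c]
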